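-- pv_equiv track=rewrite | github.com/craiglow68/Hill_and_Sub_Cracker | hillcipher.py | decryptionKey
-- ===== SOURCE A (Python) =====
-- def decryptionKey(key):
--     determinant = getDeterminant(key)
--
--     if (determinant == None):
--         return None
--     else:
--         invert = [[key[1][1] % 26, (key[0][1]*-1) %
--                    26], [(key[1][0]*-1) % 26, key[0][0] % 26]]
--
--     ret = [[], []]
--
--     for i in range(2):
--         ret[i].append((invert[i][0] * determinant) % 26)
--         ret[i].append((invert[i][1] * determinant) % 26)
--
--     return ret
--
-- def multiplicativeInverse(key, mod):
--     x = 0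
--     y = 1
--     u = 1
--     v = 0
--     a = key
--     b = mod
--
--     while a != 0:
--         quotient = b//a
--         remainder = b % a
--         m = x-u*quotient
--         n = y-v*quotient
--         b = a
--         a = remainder
--         x = u
--         y = v
--         u = m
--         v = n
--
--     gcd = b
--
--     if gcd != 1:
--         return None
--     else:
--         return x % mod
--
-- def getDeterminant(key):
--     a = key[0][0] * key[1][1]
--     b = key[0][1] * key[1][0]
--
--     determinant = a - b
--
--     determinant = determinant % 26
--
--     if determinant == 0:  # Effectively short-circuits multiplicativeInverse
--         return None
--
--     ret = multiplicativeInverse(determinant, 26)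
--
--     if ret == None:
--         return None
--
--     return ret
-- ===== SOURCE B (Python) =====
-- # B inverts the key by solving the two linear systems K*x = e1 and K*x = e2 over Z_26
-- # by exhaustive search over the 26*26 residue pairs, instead of det/inverse/adjugate.
-- def _solveCol(a, b, c, d, e, f):
--     for p in range(26):
--         for r in range(26):
--             if (a * p + b * r) % 26 == e and (c * p + d * r) % 26 == f:
--                 return (p, r)
--     return None
--
-- def decryptionKey(key):
--     a, b = key[0][0], key[0][1]
--     c, d = key[1][0], key[1][1]
--     col1 = _solveCol(a, b, c, d, 1, 0)
--     col2 = _solveCol(a, b, c, d, 0, 1)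
--     if col1 is None or col2 is None:
--         return None
--     p, r = col1
--     q, s = col2
--     return [[p, q], [r, s]]
-- ===== Notes on version B (the rewrite author's own statement) =====
-- stated objective: alternative
-- what changed: Instead of determinant / modular-inverse / scaled adjugate, B inverts the key by directly solving the two linear systems K*x=e1 and K*x=e2 over Z_26 with an exhaustive search over the 676 residue pairs, returning None when a column has no solution.
import Mathlib
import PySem

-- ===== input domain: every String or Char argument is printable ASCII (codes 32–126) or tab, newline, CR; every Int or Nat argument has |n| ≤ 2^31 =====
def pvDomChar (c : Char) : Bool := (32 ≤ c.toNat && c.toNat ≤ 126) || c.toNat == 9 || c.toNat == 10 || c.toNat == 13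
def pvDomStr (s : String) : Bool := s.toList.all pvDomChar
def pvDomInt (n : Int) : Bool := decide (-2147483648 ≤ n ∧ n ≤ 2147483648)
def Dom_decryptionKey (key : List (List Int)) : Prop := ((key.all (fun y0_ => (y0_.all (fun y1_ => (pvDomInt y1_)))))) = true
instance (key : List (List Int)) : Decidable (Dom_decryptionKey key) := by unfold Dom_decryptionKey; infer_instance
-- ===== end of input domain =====

-- B inverts the key by brute-force solving K*x=e1 and K*x=e2 over Z_26 (column search)
-- instead of A's determinant / extended-Euclid inverse / scaled adjugate (alternative algorithm, similar cost).


-- ===== PORT A =====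
-- key[i][j] for literal indices; Pre_ guarantees in range, so the .getD defaults are unreachable on claimed inputs
def pvIdx (key : List (List Int)) (i j : Int) : Int :=
  (PySem.List.pyGet? ((PySem.List.pyGet? key i).getD []) j).getD 0

-- the 'while a != 0' loop of multiplicativeInverse; fuel only makes the loop structurally total
-- (on the inputs A feeds it — 1 ≤ key < 26, mod = 26 — Euclid terminates long before 100 steps)
def pvEuclidLoop : Nat → Int → Int → Int → Int → Int → Int → Int × Int
  | 0, _, b, x, _, _, _ => (x, b)
  | fuel + 1, a, b, x, y, u, v =>
    if a = 0 then (x, b)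
    else
      let quotient := PySem.Int.floordiv b a
      let remainder := PySem.Int.mod b a
      let m := x - u * quotient
      let n := y - v * quotient
      pvEuclidLoop fuel remainder a u v m n

def multiplicativeInverse (key md : Int) : Option Int :=
  let (x, gcd) := pvEuclidLoop 100 key md 0 1 1 0
  if gcd ≠ 1 then none else some (PySem.Int.mod x md)

def getDeterminant (key : List (List Int)) : Option Int :=
  let a := pvIdx key 0 0 * pvIdx key 1 1
  let b := pvIdx key 0 1 * pvIdx key 1 0
  let determinant := PySem.Int.mod (a - b) 26
  if determinant = 0 then none
  else
    match multiplicativeInverse determinant 26 with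
    | none => none
    | some ret => some ret

def decryptionKey (key : List (List Int)) : Option (List (List Int)) :=
  match getDeterminant key with
  | none => none
  | some determinant =>
    let invert : List (List Int) :=
      [[PySem.Int.mod (pvIdx key 1 1) 26, PySem.Int.mod (pvIdx key 0 1 * -1) 26],
       [PySem.Int.mod (pvIdx key 1 0 * -1) 26, PySem.Int.mod (pvIdx key 0 0) 26]]
    let ret : List (List Int) := [[], []]
    -- ret[i].append(e) is modeled as replacing row i by row ++ [e]; i ∈ {0,1} so i.toNat is exact
    let ret := (PySem.List.pyRange 0 2 1).foldl (fun ret i =>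
      let row := (PySem.List.pyGet? ret i).getD []
      let row := row ++ [PySem.Int.mod ((PySem.List.pyGet? ((PySem.List.pyGet? invert i).getD []) 0).getD 0 * determinant) 26]
      let row := row ++ [PySem.Int.mod ((PySem.List.pyGet? ((PySem.List.pyGet? invert i).getD []) 1).getD 0 * determinant) 26]
      ret.set i.toNat row) ret
    some ret

-- ===== PORT B =====
-- the residue pairs (p, r), p = 0..25, r = 0..25, in B's loop order
def pvPairs : List (Int × Int) :=
  (List.range 26).flatMap (fun p => (List.range 26).map (fun r => ((p : Int), (r : Int))))

-- _solveCol: first (p, r) with (a*p + b*r) % 26 == e and (c*p + d*r) % 26 == f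
def solveCol (a b c d e f : Int) : Option (Int × Int) :=
  pvPairs.find? (fun pr =>
    (PySem.Int.mod (a * pr.1 + b * pr.2) 26 == e) && (PySem.Int.mod (c * pr.1 + d * pr.2) 26 == f))

def decryptionKey_alt (key : List (List Int)) : Option (List (List Int)) :=
  match key with
  | (a :: b :: _) :: (c :: d :: _) :: _ =>
    match solveCol a b c d 1 0, solveCol a b c d 0 1 with
    | some (p, r), some (q, s) => some [[p, q], [r, s]]
    | _, _ => none
  | _ => none  -- key[0][0] etc. would raise IndexError in Python; outside Pre_

-- ===== PRECONDITION & SPEC =====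
-- Pre_ excludes exactly the inputs on which A raises IndexError: fewer than two rows, or a first
-- or second row with fewer than two entries.
def Pre_decryptionKey (key : List (List Int)) : Prop :=
  2 ≤ key.length ∧ 2 ≤ (key.getD 0 []).length ∧ 2 ≤ (key.getD 1 []).length
instance (key : List (List Int)) : Decidable (Pre_decryptionKey key) := by
  unfold Pre_decryptionKey; infer_instance
def pvWitness_decryptionKey : List (List Int) := [[3, 3], [2, 5]]

def Spec_decryptionKey (key : List (List Int)) (out : Option (List (List Int))) : Prop := out = decryptionKey_alt key
instance (key : List (List Int)) (out : Option (List (List Int))) : Decidable (Spec_decryptionKey key out) := by unfold Spec_decryptionKey; infer_instance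

-- ===== CLAIM (what is proved, stated in full; the proofs are below) =====
def Claim_equal_decryptionKey : Prop := ∀ (key : List (List Int)), Dom_decryptionKey key → Pre_decryptionKey key → Spec_decryptionKey key (decryptionKey key)

-- ===== LEMMAS AND PROOFS =====

-- casting x % 26 into ZMod 26 forgets the reduction
lemma cast_mod26 (x : Int) : ((PySem.Int.mod x 26 : Int) : ZMod 26) = (x : ZMod 26) := by
  rw [PySem.Int.mod_eq_emod_of_pos (by norm_num)]
  exact_mod_cast ZMod.intCast_mod x 26

lemma int_eq_of_cast26 {x y : Int} (hx0 : 0 ≤ x) (hx : x < 26) (hy0 : 0 ≤ y) (hy : y < 26)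
    (h : (x : ZMod 26) = (y : ZMod 26)) : x = y := by
  rw [ZMod.intCast_eq_intCast_iff'] at h
  omega

lemma find?_eq_some_of_unique {α : Type} (p : α → Bool) (l : List α) (a : α)
    (ha : a ∈ l) (hp : p a = true) (uniq : ∀ x ∈ l, p x = true → x = a) :
    l.find? p = some a := by
  induction l with
  | nil => cases ha
  | cons h t ih =>
    by_cases hph : p h = true
    · rw [List.find?_cons_of_pos hph, uniq h List.mem_cons_self hph]
    · rw [List.find?_cons_of_neg hph]
      rcases List.mem_cons.mp ha with rfl | hat
      · exact absurd hp hph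
      · exact ih hat (fun x hx hpx => uniq x (List.mem_cons_of_mem _ hx) hpx)

lemma mem_pvPairs {p r : Int} : (p, r) ∈ pvPairs ↔ (0 ≤ p ∧ p < 26 ∧ 0 ≤ r ∧ r < 26) := by
  simp [pvPairs]
  constructor
  · rintro ⟨⟨a', ha', rfl⟩, ⟨b', hb', rfl⟩⟩
    omega
  · rintro ⟨hp0, hp1, hr0, hr1⟩
    exact ⟨⟨p.toNat, by omega, by omega⟩, ⟨r.toNat, by omega, by omega⟩⟩

lemma pred_iff (a b c d e f p r : Int) (he0 : 0 ≤ e) (he1 : e < 26) (hf0 : 0 ≤ f) (hf1 : f < 26) :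
    (((PySem.Int.mod (a * p + b * r) 26 == e) && (PySem.Int.mod (c * p + d * r) 26 == f)) = true)
    ↔ (((a * p + b * r : Int) : ZMod 26) = (e : ZMod 26) ∧ ((c * p + d * r : Int) : ZMod 26) = (f : ZMod 26)) := by
  simp only [Bool.and_eq_true, beq_iff_eq]
  constructor
  · rintro ⟨h1, h2⟩
    rw [← cast_mod26 (a * p + b * r), h1, ← cast_mod26 (c * p + d * r), h2]
    exact ⟨rfl, rfl⟩
  · rintro ⟨h1, h2⟩
    constructor
    · exact int_eq_of_cast26 (PySem.Int.mod_nonneg _ (by norm_num)) (PySem.Int.mod_lt _ (by norm_num)) he0 he1 (by rw [cast_mod26]; exact h1)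
    · exact int_eq_of_cast26 (PySem.Int.mod_nonneg _ (by norm_num)) (PySem.Int.mod_lt _ (by norm_num)) hf0 hf1 (by rw [cast_mod26]; exact h2)

lemma solveCol_eq_some (a b c d e f p0 r0 : Int)
    (he0 : 0 ≤ e) (he1 : e < 26) (hf0 : 0 ≤ f) (hf1 : f < 26)
    (hp : 0 ≤ p0 ∧ p0 < 26) (hr : 0 ≤ r0 ∧ r0 < 26)
    (h1 : ((a * p0 + b * r0 : Int) : ZMod 26) = (e : ZMod 26))
    (h2 : ((c * p0 + d * r0 : Int) : ZMod 26) = (f : ZMod 26))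
    (uniq : ∀ p r : Int, 0 ≤ p → p < 26 → 0 ≤ r → r < 26 →
      ((a * p + b * r : Int) : ZMod 26) = (e : ZMod 26) →
      ((c * p + d * r : Int) : ZMod 26) = (f : ZMod 26) → p = p0 ∧ r = r0) :
    solveCol a b c d e f = some (p0, r0) := by
  apply find?_eq_some_of_unique
  · exact mem_pvPairs.mpr ⟨hp.1, hp.2, hr.1, hr.2⟩
  · exact (pred_iff a b c d e f p0 r0 he0 he1 hf0 hf1).mpr ⟨h1, h2⟩
  · rintro ⟨p, r⟩ hmem hpred
    obtain ⟨h1', h2'⟩ := (pred_iff a b c d e f p r he0 he1 hf0 hf1).mp hpred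
    obtain ⟨hp0, hp1, hr0, hr1⟩ := mem_pvPairs.mp hmem
    obtain ⟨ep, er⟩ := uniq p r hp0 hp1 hr0 hr1 h1' h2'
    simp [ep, er]

lemma solveCol_some_prop (a b c d e f p r : Int)
    (he0 : 0 ≤ e) (he1 : e < 26) (hf0 : 0 ≤ f) (hf1 : f < 26)
    (h : solveCol a b c d e f = some (p, r)) :
    ((a * p + b * r : Int) : ZMod 26) = (e : ZMod 26) ∧ ((c * p + d * r : Int) : ZMod 26) = (f : ZMod 26) := by
  unfold solveCol at h
  have hp := List.find?_some h
  exact (pred_iff a b c d e f p r he0 he1 hf0 hf1).mp hp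

-- A's determinant test + extended Euclid, characterised per residue: a bounded inverse
-- with (d*v) % 26 = 1, or no inverse of d exists in ZMod 26
lemma euclid_char (d0 : Int) (h0 : 0 ≤ d0) (h1 : d0 < 26) :
    ((multiplicativeInverse d0 26).all
        (fun v => decide (0 ≤ v ∧ v < 26 ∧ PySem.Int.mod (d0 * v) 26 = 1)) = true)
    ∧ (multiplicativeInverse d0 26 = none → ∀ w : ZMod 26, (d0 : ZMod 26) * w ≠ 1) := by
  interval_cases d0 <;> exact ⟨by decide, by decide⟩

-- A's value on a well-shaped key, in closed form
lemma eIdx (k00 k01 k10 k11 : Int) (t0 t1 : List Int) (rest : List (List Int)) :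
    pvIdx ((k00 :: k01 :: t0) :: (k10 :: k11 :: t1) :: rest) 0 0 = k00 ∧
    pvIdx ((k00 :: k01 :: t0) :: (k10 :: k11 :: t1) :: rest) 0 1 = k01 ∧
    pvIdx ((k00 :: k01 :: t0) :: (k10 :: k11 :: t1) :: rest) 1 0 = k10 ∧
    pvIdx ((k00 :: k01 :: t0) :: (k10 :: k11 :: t1) :: rest) 1 1 = k11 := by
  have hc : ∀ n : Nat, (0:Int) ≤ (n:Int) + 1 := fun n => by positivity
  refine ⟨?_, ?_, ?_, ?_⟩ <;> simp [pvIdx, PySem.List.pyGet?, PySem.List.pyIdx?, hc]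

lemma A_closed (k00 k01 k10 k11 : Int) (t0 t1 : List Int) (rest : List (List Int)) :
    decryptionKey ((k00 :: k01 :: t0) :: (k10 :: k11 :: t1) :: rest) =
      (if PySem.Int.mod (k00 * k11 - k01 * k10) 26 = 0 then none else
       match multiplicativeInverse (PySem.Int.mod (k00 * k11 - k01 * k10) 26) 26 with
       | none => none
       | some v => some [[PySem.Int.mod (PySem.Int.mod k11 26 * v) 26,
                          PySem.Int.mod (PySem.Int.mod (k01 * -1) 26 * v) 26],
                         [PySem.Int.mod (PySem.Int.mod (k10 * -1) 26 * v) 26,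
                          PySem.Int.mod (PySem.Int.mod k00 26 * v) 26]]) := by
  obtain ⟨e00, e01, e10, e11⟩ := eIdx k00 k01 k10 k11 t0 t1 rest
  simp only [decryptionKey, getDeterminant, e00, e01, e10, e11]
  split_ifs with h
  · rfl
  · rcases hm : multiplicativeInverse (PySem.Int.mod (k00 * k11 - k01 * k10) 26) 26 with _ | v
    · rfl
    · have hr : PySem.List.pyRange 0 2 1 = [0, 1] := by decide
      simp [hr, List.foldl, PySem.List.pyGet?, PySem.List.pyIdx?]

-- ===== VERDICT (by name: the statement is the Claim_ definition above) =====
theorem decryptionKey_spec : Claim_equal_decryptionKey := by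
  intro key _ hpre
  obtain ⟨h1, h2, h3⟩ := hpre
  unfold Spec_decryptionKey
  rcases key with _ | ⟨r0, key⟩; · simp at h1
  rcases key with _ | ⟨r1, rest⟩; · simp at h1
  rcases r0 with _ | ⟨a, r0⟩; · simp at h2
  rcases r0 with _ | ⟨b, t0⟩; · simp at h2
  rcases r1 with _ | ⟨c, r1⟩; · simp at h3
  rcases r1 with _ | ⟨d, t1⟩; · simp at h3
  rw [A_closed]
  -- no-inverse cases: both solveCols cannot succeed, so B is none too
  have noinv : (∀ w : ZMod 26, ((a * d - b * c : Int) : ZMod 26) * w ≠ 1) →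
      decryptionKey_alt ((a :: b :: t0) :: (c :: d :: t1) :: rest) = none := by
    intro hno
    simp only [decryptionKey_alt]
    rcases hc1 : solveCol a b c d 1 0 with _ | ⟨p, r⟩
    · rfl
    rcases hc2 : solveCol a b c d 0 1 with _ | ⟨q, s⟩
    · rfl
    exfalso
    obtain ⟨e1, e2⟩ := solveCol_some_prop a b c d 1 0 p r (by norm_num) (by norm_num) (by norm_num) (by norm_num) hc1
    obtain ⟨e3, e4⟩ := solveCol_some_prop a b c d 0 1 q s (by norm_num) (by norm_num) (by norm_num) (by norm_num) hc2
    push_cast at e1 e2 e3 e4 ⊢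
    apply hno ((p * s - q * r : Int) : ZMod 26)
    push_cast
    have hkey : (((a : ZMod 26)) * p + (b : ZMod 26) * r) * (((c : ZMod 26)) * q + (d : ZMod 26) * s)
        - (((a : ZMod 26)) * q + (b : ZMod 26) * s) * (((c : ZMod 26)) * p + (d : ZMod 26) * r)
        = ((a : ZMod 26) * (d : ZMod 26) - (b : ZMod 26) * (c : ZMod 26)) * ((p : ZMod 26) * (s : ZMod 26) - (q : ZMod 26) * (r : ZMod 26)) := by
      ring
    rw [e1, e2, e3, e4] at hkey
    simpa using hkey.symm
  split_ifs with hd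
  · -- determinant ≡ 0: the adjugate branch is dead, and no column pair can solve K*M = I
    refine (noinv ?_).symm
    intro w
    rw [← cast_mod26, hd]
    simp
    decide
  · rcases hE : multiplicativeInverse (PySem.Int.mod (a * d - b * c) 26) 26 with _ | v
    · -- Euclid found gcd ≠ 1: no inverse of the determinant exists
      have hch := (euclid_char (PySem.Int.mod (a * d - b * c) 26)
        (PySem.Int.mod_nonneg _ (by norm_num)) (PySem.Int.mod_lt _ (by norm_num))).2 hE
      refine (noinv ?_).symm
      intro w hw
      exact hch w (by rw [cast_mod26]; exact hw)
    · -- Euclid found the inverse v of the determinant: both solveCols find the adjugate columns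
      have hch := (euclid_char (PySem.Int.mod (a * d - b * c) 26)
        (PySem.Int.mod_nonneg _ (by norm_num)) (PySem.Int.mod_lt _ (by norm_num))).1
      rw [hE] at hch
      simp only [Option.all_some, decide_eq_true_eq] at hch
      obtain ⟨hv0, hv1, hmod⟩ := hch
      have hvz : ((a * d - b * c : Int) : ZMod 26) * ((v : Int) : ZMod 26) = 1 := by
        have := congrArg (fun x : Int => ((x : ZMod 26))) hmod
        simp only at this
        rw [cast_mod26] at this
        push_cast at this
        rw [← cast_mod26 (a * d - b * c)]
        linear_combination this
      push_cast at hvz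
      have mb : ∀ x : Int, 0 ≤ PySem.Int.mod x 26 ∧ PySem.Int.mod x 26 < 26 :=
        fun x => ⟨PySem.Int.mod_nonneg _ (by norm_num), PySem.Int.mod_lt _ (by norm_num)⟩
      have cm : ∀ x : Int, ((PySem.Int.mod (PySem.Int.mod x 26 * v) 26 : Int) : ZMod 26) = (x : ZMod 26) * ((v : Int) : ZMod 26) := by
        intro x
        rw [cast_mod26, Int.cast_mul, cast_mod26]
      have hcol1 : solveCol a b c d 1 0 =
          some (PySem.Int.mod (PySem.Int.mod d 26 * v) 26, PySem.Int.mod (PySem.Int.mod (c * -1) 26 * v) 26) := by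
        apply solveCol_eq_some a b c d 1 0 _ _ (by norm_num) (by norm_num) (by norm_num) (by norm_num) (mb _) (mb _)
        · push_cast [cm]
          linear_combination hvz
        · push_cast [cm]
          ring
        · intro p r hp0 hp1 hr0 hr1 hx hy
          push_cast at hx hy
          constructor
          · refine int_eq_of_cast26 hp0 hp1 (mb _).1 (mb _).2 ?_
            rw [cm]
            linear_combination ((d : ZMod 26) * v) * hx - ((b : ZMod 26) * v) * hy - (p : ZMod 26) * hvz
          · refine int_eq_of_cast26 hr0 hr1 (mb _).1 (mb _).2 ?_
            rw [cm]
            push_cast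
            linear_combination (-((c : ZMod 26) * v)) * hx + ((a : ZMod 26) * v) * hy - (r : ZMod 26) * hvz
      have hcol2 : solveCol a b c d 0 1 =
          some (PySem.Int.mod (PySem.Int.mod (b * -1) 26 * v) 26, PySem.Int.mod (PySem.Int.mod a 26 * v) 26) := by
        apply solveCol_eq_some a b c d 0 1 _ _ (by norm_num) (by norm_num) (by norm_num) (by norm_num) (mb _) (mb _)
        · push_cast [cm]
          ring
        · push_cast [cm]
          linear_combination hvz
        · intro q s hq0 hq1 hs0 hs1 hx hy
          push_cast at hx hy
          constructor
          · refine int_eq_of_cast26 hq0 hq1 (mb _).1 (mb _).2 ?_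
            rw [cm]
            push_cast
            linear_combination ((d : ZMod 26) * v) * hx - ((b : ZMod 26) * v) * hy - (q : ZMod 26) * hvz
          · refine int_eq_of_cast26 hs0 hs1 (mb _).1 (mb _).2 ?_
            rw [cm]
            linear_combination (-((c : ZMod 26) * v)) * hx + ((a : ZMod 26) * v) * hy - (s : ZMod 26) * hvz
      simp only [decryptionKey_alt, hcol1, hcol2]
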